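-- pv_equiv track=rewrite | github.com/CaioCasemiro/Trabalho-IA | src/utils.py | gerar_arvore_busca
-- ===== SOURCE A (Python) =====
-- def reconstruir_caminho(arvore_map, estado_objetivo_tuple):
--     caminho = []
--     atual = estado_objetivo_tuple
--     while atual is not None:
--         caminho.append(atual)
--         atual = arvore_map.get(atual)
--     return caminho[::-1]
--
-- def formatar_estado(estado, tamanho):
--     linhas = []
--     for i in range(tamanho):
--         linha = estado[i * tamanho: (i + 1) * tamanho]
--         linhas.append(" ".join(str(x) if x != 0 else " " for x in linha))
--     return " | ".join(linhas)
--
-- def gerar_arvore_busca(arvore_map, estado_objetivo_tuple, tamanho, movimentos=None):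
--     caminho_solucao = set(reconstruir_caminho(arvore_map, estado_objetivo_tuple))
--     filhos_por_pai = {}
--     for filho, pai in arvore_map.items():
--         if pai not in filhos_por_pai:
--             filhos_por_pai[pai] = []
--         filhos_por_pai[pai].append(filho)
--
--     def imprimir(no, profundidade=0, prefixo="", visitados=None):
--         if visitados is None:
--             visitados = set()
--         visitados.add(no)
--         linhas = []
--         is_caminho = no in caminho_solucao
--         estado_str = formatar_estado(no, tamanho)
--         mov = ""
--         if movimentos and no in movimentos:
--             mov = f"[{movimentos[no]}]"
--         if is_caminho:
--             linha = f"{prefixo}*** Prof {profundidade} {mov}: {estado_str} ***"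
--         else:
--             linha = f"{prefixo}Prof {profundidade} {mov}: {estado_str}"
--         linhas.append(linha)
--
--         filhos = filhos_por_pai.get(no, [])
--         for i, filho in enumerate(filhos):
--             if filho in visitados:
--                 continue
--             if i == len(filhos) - 1:
--                 novo_prefixo = prefixo + "    "
--             else:
--                 novo_prefixo = prefixo + "│   "
--             linhas.extend(imprimir(filho, profundidade + 1, novo_prefixo, visitados))
--         return linhas
--
--     raiz = None
--     for filho, pai in arvore_map.items():
--         if pai is None:
--             raiz = filho
--             break
--     if raiz is None:
--         return "Árvore vazia ou não encontrada."
--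
--     linhas = imprimir(raiz)
--     return "\n".join(linhas)
-- ===== SOURCE B (Python) =====
-- def formatar_estado(estado, tamanho):
--     linhas = []
--     for i in range(tamanho):
--         linha = estado[i * tamanho: (i + 1) * tamanho]
--         linhas.append(" ".join(str(x) if x != 0 else " " for x in linha))
--     return " | ".join(linhas)
--
--
-- def gerar_arvore_busca(arvore_map, estado_objetivo_tuple, tamanho, movimentos=None):
--     # Solution path as a set, accumulated directly while walking the parent chain.
--     caminho_solucao = set()
--     atual = estado_objetivo_tuple
--     while atual is not None:
--         caminho_solucao.add(atual)
--         atual = arvore_map.get(atual)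
--
--     raiz = next((filho for filho, pai in arvore_map.items() if pai is None), None)
--     if raiz is None:
--         return "Árvore vazia ou não encontrada."
--
--     # Explicit-stack pre-order traversal; children are found on demand by
--     # filtering the map instead of pre-building a children index.
--     linhas = []
--     visitados = set()
--     pilha = [(raiz, 0, "")]
--     while pilha:
--         no, profundidade, prefixo = pilha.pop()
--         if no in visitados:
--             continue
--         visitados.add(no)
--         estado_str = formatar_estado(no, tamanho)
--         mov = ""
--         if movimentos and no in movimentos:
--             mov = f"[{movimentos[no]}]"
--         if no in caminho_solucao:
--             linhas.append(f"{prefixo}*** Prof {profundidade} {mov}: {estado_str} ***")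
--         else:
--             linhas.append(f"{prefixo}Prof {profundidade} {mov}: {estado_str}")
--         filhos = [filho for filho, pai in arvore_map.items() if pai == no]
--         ultimo = len(filhos) - 1
--         pilha.extend((filho, profundidade + 1,
--                       prefixo + ("    " if i == ultimo else "│   "))
--                      for i, filho in reversed(list(enumerate(filhos))))
--     return "\n".join(linhas)
-- ===== Notes on version B (the rewrite author's own statement) =====
-- stated objective: alternative
-- what changed: The recursive imprimir with a pre-built filhos_por_pai children index is replaced by an explicit-stack pre-order loop that finds each node's children on demand by filtering the map, and the solution path is accumulated directly into a set while walking the parent chain instead of building a list, reversing it and converting to a set.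
import Mathlib
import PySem

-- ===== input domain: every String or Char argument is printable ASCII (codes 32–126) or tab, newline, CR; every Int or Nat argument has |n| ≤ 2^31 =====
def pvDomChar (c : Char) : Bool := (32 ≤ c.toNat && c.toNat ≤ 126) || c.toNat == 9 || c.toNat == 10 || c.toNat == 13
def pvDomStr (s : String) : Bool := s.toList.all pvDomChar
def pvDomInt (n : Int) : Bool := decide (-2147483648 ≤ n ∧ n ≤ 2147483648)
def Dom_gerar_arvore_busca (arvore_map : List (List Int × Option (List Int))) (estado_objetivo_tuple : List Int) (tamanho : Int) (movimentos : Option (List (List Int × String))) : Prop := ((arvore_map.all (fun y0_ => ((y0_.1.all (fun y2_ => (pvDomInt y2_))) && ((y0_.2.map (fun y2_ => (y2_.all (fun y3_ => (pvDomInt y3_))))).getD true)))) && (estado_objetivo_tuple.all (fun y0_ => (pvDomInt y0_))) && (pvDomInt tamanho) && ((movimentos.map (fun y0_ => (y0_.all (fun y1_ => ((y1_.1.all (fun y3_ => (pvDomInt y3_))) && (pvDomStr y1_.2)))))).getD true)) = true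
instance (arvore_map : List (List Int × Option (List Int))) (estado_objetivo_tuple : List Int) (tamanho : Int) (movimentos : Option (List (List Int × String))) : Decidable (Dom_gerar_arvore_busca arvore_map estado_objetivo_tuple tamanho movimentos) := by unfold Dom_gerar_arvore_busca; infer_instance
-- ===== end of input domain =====

-- B replaces the recursive tree printer + pre-built children index by an explicit-stack
-- pre-order loop that filters the map for children on demand (objective: alternative).

-- ===== shared module-level formatting helper (formatar_estado, used verbatim by A and Source B) =====
def pvFormatarEstado (estado : List Int) (tamanho : Int) : String :=
  PySem.Str.join " | " ((PySem.List.pyRange 0 tamanho 1).map (fun i =>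
    PySem.Str.join " " ((PySem.List.slice estado (some (i * tamanho)) (some ((i + 1) * tamanho))).map
      (fun x => if x ≠ 0 then PySem.Int.toStr x else " "))))

-- one output line (both Pythons build it with the same f-string pattern)
def pvLinha (tamanho : Int) (movimentos : Option (List (List Int × String)))
    (no : List Int) (prof : Int) (prefixo : String) (is_caminho : Bool) : String :=
  let estado_str := pvFormatarEstado no tamanho
  let mov : String := match movimentos with
    | none => ""   -- `movimentos and no in movimentos`: falsy movimentos gives ""
    | some mv => match (PySem.Dict.mk mv).get? no with
      | some s => "[" ++ s ++ "]"
      | none => ""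
  if is_caminho then
    prefixo ++ "*** Prof " ++ PySem.Int.toStr prof ++ " " ++ mov ++ ": " ++ estado_str ++ " ***"
  else
    prefixo ++ "Prof " ++ PySem.Int.toStr prof ++ " " ++ mov ++ ": " ++ estado_str

-- ===== PORT A =====
-- reconstruir_caminho's while loop (forward list; fuel is a totality guard only —
-- any acyclic parent chain is shorter than the fuel)
def pvWalkA (m : List (List Int × Option (List Int))) : Nat → List Int → List (List Int)
  | 0, _ => []
  | fuel+1, atual =>
    atual :: (match ((PySem.Dict.mk m).get? atual).join with
      | none => []
      | some p => pvWalkA m fuel p)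

-- `for filho, pai in arvore_map.items(): if pai is None: raiz = filho; break`
def pvFindRaiz : List (List Int × Option (List Int)) → Option (List Int)
  | [] => none
  | (filho, pai) :: rest => match pai with
    | none => some filho
    | some _ => pvFindRaiz rest

-- `if pai not in d: d[pai] = []; d[pai].append(filho)`  =  d.modify pai [] (· ++ [filho])
def pvFilhosPorPai (m : List (List Int × Option (List Int))) :
    PySem.Dict (Option (List Int)) (List (List Int)) :=
  m.foldl (fun d fp => d.modify fp.2 [] (fun l => l ++ [fp.1])) PySem.Dict.empty

-- lexicographic helper cited by the mutual block's decreasing_by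
lemma pv_lex_aux {a b n m : Nat} (h1 : a ≤ b) (h2 : n < m) :
    Prod.Lex (· < ·) (· < ·) (a, n) (b, m) := by
  rcases Nat.eq_or_lt_of_le h1 with h | h
  · subst h; exact Prod.Lex.right _ h2
  · exact Prod.Lex.left _ _ h

-- the recursive `imprimir` (closure-converted: cam = `in caminho_solucao`, ch = children lookup);
-- fuel is consumed once per emitted line, a totality guard only
mutual
def pvImpr (t : Int) (mov : Option (List (List Int × String))) (cam : List Int → Bool)
    (ch : List Int → List (List Int)) (fuel : Nat) (no : List Int) (prof : Int)
    (pre : String) (vis : PySem.Set (List Int)) : List String × PySem.Set (List Int) :=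
  match fuel with
  | 0 => ([], vis)
  | fuel'+1 =>
    let vis1 := PySem.Set.add vis no
    let linha := pvLinha t mov no prof pre (cam no)
    let filhos := ch no
    let r := pvImprGo t mov cam ch fuel' filhos 0 (filhos.length) prof pre vis1
    (linha :: r.1, r.2)
termination_by (fuel, 0)
decreasing_by exact Prod.Lex.left _ _ (Nat.lt_succ_self _)

def pvImprGo (t : Int) (mov : Option (List (List Int × String))) (cam : List Int → Bool)
    (ch : List Int → List (List Int)) (fuel : Nat) (fs : List (List Int)) (i : Int) (n : Int)
    (prof : Int) (pre : String) (vis : PySem.Set (List Int)) : List String × PySem.Set (List Int) :=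
  match fs with
  | [] => ([], vis)
  | f :: fs' =>
    if PySem.Set.contains vis f then
      pvImprGo t mov cam ch fuel fs' (i + 1) n prof pre vis
    else
      let novo := pre ++ (if i == n - 1 then "    " else "│   ")
      let r1 := pvImpr t mov cam ch fuel f (prof + 1) novo vis
      let r2 := pvImprGo t mov cam ch (fuel - r1.1.length) fs' (i + 1) n prof pre r1.2
      (r1.1 ++ r2.1, r2.2)
termination_by (fuel, fs.length + 1)
decreasing_by
· exact pv_lex_aux (Nat.le_refl _) (by rw [List.length_cons]; omega)
· exact pv_lex_aux (Nat.le_refl _) (by rw [List.length_cons]; omega)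
· exact pv_lex_aux (Nat.sub_le _ _) (by rw [List.length_cons]; omega)
end

def gerar_arvore_busca (arvore_map : List (List Int × Option (List Int))) (estado_objetivo_tuple : List Int) (tamanho : Int) (movimentos : Option (List (List Int × String))) : String :=
  -- caminho_solucao = set(reconstruir_caminho(...))  (list, reversed, made a set)
  let caminho_solucao : PySem.Set (List Int) :=
    PySem.Set.ofList (pvWalkA arvore_map (arvore_map.length + 2) estado_objetivo_tuple).reverse
  let filhos_por_pai := pvFilhosPorPai arvore_map
  match pvFindRaiz arvore_map with
  | none => "Árvore vazia ou não encontrada."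
  | some raiz =>
    PySem.Str.join "\n"
      (pvImpr tamanho movimentos (fun no => PySem.Set.contains caminho_solucao no)
        (fun no => filhos_por_pai.getD (some no) [])
        (arvore_map.length + 2) raiz 0 "" PySem.Set.empty).1

-- ===== PORT B =====
-- the parent-chain walk of Source B, accumulating the set directly (same fuel scheme as pvWalkA)
def pvWalkB (m : List (List Int × Option (List Int))) : Nat → List Int → PySem.Set (List Int) → PySem.Set (List Int)
  | 0, _, s => s
  | fuel+1, atual, s =>
    let s1 := PySem.Set.add s atual
    match ((PySem.Dict.mk m).get? atual).join with
    | none => s1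
    | some p => pvWalkB m fuel p s1

-- frames Source B pushes for the children (top of stack = head, so pop order is left-to-right)
def pvFrames : List (List Int) → Int → Int → Int → String → List (List Int × Int × String)
  | [], _, _, _, _ => []
  | f :: fs, i, n, prof, pre =>
    (f, prof + 1, pre ++ (if i == n - 1 then "    " else "│   ")) :: pvFrames fs (i + 1) n prof pre

-- the `while pilha:` loop; fuel is consumed once per emitted line, a totality guard only
def pvLoop (t : Int) (mov : Option (List (List Int × String))) (cam : List Int → Bool)
    (ch : List Int → List (List Int)) (fuel : Nat) (stack : List (List Int × Int × String))
    (vis : PySem.Set (List Int)) : List String :=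
  match stack with
  | [] => []
  | (no, prof, pre) :: rest =>
    if PySem.Set.contains vis no then pvLoop t mov cam ch fuel rest vis
    else match fuel with
      | 0 => []
      | fuel'+1 =>
        let vis1 := PySem.Set.add vis no
        let linha := pvLinha t mov no prof pre (cam no)
        let filhos := ch no
        linha :: pvLoop t mov cam ch fuel' (pvFrames filhos 0 (filhos.length) prof pre ++ rest) vis1
termination_by (fuel, stack.length)
decreasing_by
· exact Prod.Lex.right _ (Nat.lt_succ_self _)
· exact Prod.Lex.left _ _ (Nat.lt_succ_self _)

def gerar_arvore_busca_alt (arvore_map : List (List Int × Option (List Int))) (estado_objetivo_tuple : List Int) (tamanho : Int) (movimentos : Option (List (List Int × String))) : String :=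
  let caminho_solucao := pvWalkB arvore_map (arvore_map.length + 2) estado_objetivo_tuple PySem.Set.empty
  match (arvore_map.find? (fun fp => fp.2 == none)).map (fun fp => fp.1) with
  | none => "Árvore vazia ou não encontrada."
  | some raiz =>
    PySem.Str.join "\n"
      (pvLoop tamanho movimentos (fun no => PySem.Set.contains caminho_solucao no)
        (fun no => (arvore_map.filter (fun fp => fp.2 == some no)).map (fun fp => fp.1))
        (arvore_map.length + 2) [(raiz, 0, "")] PySem.Set.empty)

-- ===== PRECONDITION & SPEC =====
-- No Pre_: the two ports agree on every input. (Python A does not return on parent-pointer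
-- cycles — reconstruir_caminho loops forever there; the fueled Lean walks truncate at
-- arvore_map.length + 2 steps, beyond any acyclic parent chain, so the ports are exact
-- wherever the Pythons return.)
def Spec_gerar_arvore_busca (arvore_map : List (List Int × Option (List Int))) (estado_objetivo_tuple : List Int) (tamanho : Int) (movimentos : Option (List (List Int × String))) (out : String) : Prop := out = gerar_arvore_busca_alt arvore_map estado_objetivo_tuple tamanho movimentos
instance (arvore_map : List (List Int × Option (List Int))) (estado_objetivo_tuple : List Int) (tamanho : Int) (movimentos : Option (List (List Int × String))) (out : String) : Decidable (Spec_gerar_arvore_busca arvore_map estado_objetivo_tuple tamanho movimentos out) := by unfold Spec_gerar_arvore_busca; infer_instance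

-- ===== CLAIM (what is proved, stated in full; the proofs are below) =====
def Claim_equal_gerar_arvore_busca : Prop := ∀ (arvore_map : List (List Int × Option (List Int))) (estado_objetivo_tuple : List Int) (tamanho : Int) (movimentos : Option (List (List Int × String))), Dom_gerar_arvore_busca arvore_map estado_objetivo_tuple tamanho movimentos → Spec_gerar_arvore_busca arvore_map estado_objetivo_tuple tamanho movimentos (gerar_arvore_busca arvore_map estado_objetivo_tuple tamanho movimentos)

-- ===== LEMMAS AND PROOFS =====

-- membership in B's incrementally built path set = membership in A's reconstructed list
lemma pv_mem_walkB (m : List (List Int × Option (List Int))) :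
    ∀ (fuel : Nat) (a : List Int) (s : PySem.Set (List Int)) (x : List Int),
    x ∈ pvWalkB m fuel a s ↔ x ∈ s ∨ x ∈ pvWalkA m fuel a := by
  intro fuel
  induction fuel with
  | zero => intro a s x; simp [pvWalkB, pvWalkA]
  | succ f ih =>
    intro a s x
    simp only [pvWalkB, pvWalkA]
    cases h : ((PySem.Dict.mk m).get? a).join with
    | none => simp [PySem.Set.mem_add]
    | some p => simp only [ih, PySem.Set.mem_add, List.mem_cons]; tauto

lemma pv_cam_eq (m : List (List Int × Option (List Int))) (est : List Int) (F : Nat) :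
    (fun no => PySem.Set.contains (pvWalkB m F est PySem.Set.empty) no)
      = (fun no => PySem.Set.contains (PySem.Set.ofList (pvWalkA m F est).reverse) no) := by
  funext no
  rw [Bool.eq_iff_iff, PySem.Set.contains_iff, PySem.Set.contains_iff, PySem.Set.mem_ofList,
    List.mem_reverse, pv_mem_walkB]
  simp [PySem.Set.empty]

-- A's grouped children index, looked up, is B's on-demand filter
lemma pv_ch_eq (m : List (List Int × Option (List Int))) :
    (fun no => (pvFilhosPorPai m).getD (some no) [])
      = (fun no => (m.filter (fun fp => fp.2 == some no)).map (fun fp => fp.1)) := by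
  funext no
  have h1 : pvFilhosPorPai m
      = (m.map Prod.swap).foldl (fun d p => d.modify p.1 [] (fun l => l ++ [p.2])) PySem.Dict.empty := by
    simp [pvFilhosPorPai, List.foldl_map, Prod.swap]
  rw [h1, PySem.Dict.getD_foldl_modify_append, List.filter_map, List.map_map]
  simp [PySem.Dict.getD_empty, Function.comp_def, Prod.swap]

-- A's break-on-first-None root search is B's find?
lemma pv_raiz_eq (m : List (List Int × Option (List Int))) :
    pvFindRaiz m = (m.find? (fun fp => fp.2 == none)).map (fun fp => fp.1) := by
  induction m with
  | nil => rfl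
  | cons fp rest ih =>
    obtain ⟨f, p⟩ := fp
    cases p with
    | none => simp [pvFindRaiz, List.find?]
    | some q => simp [pvFindRaiz, List.find?, ih]

-- exhausted fuel: the stack loop emits nothing
lemma pv_loop_zero (t : Int) (mov : Option (List (List Int × String))) (cam : List Int → Bool)
    (ch : List Int → List (List Int)) :
    ∀ (stack : List (List Int × Int × String)) (vis : PySem.Set (List Int)),
    pvLoop t mov cam ch 0 stack vis = [] := by
  intro stack
  induction stack with
  | nil => intro vis; simp [pvLoop]
  | cons fr rest ih =>
    intro vis
    obtain ⟨no, prof, pre⟩ := fr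
    simp only [pvLoop]
    split
    · exact ih vis
    · rfl

-- exhausted fuel: the recursive sibling fold emits nothing and leaves vis unchanged
lemma pv_go_zero (t : Int) (mov : Option (List (List Int × String))) (cam : List Int → Bool)
    (ch : List Int → List (List Int)) :
    ∀ (fs : List (List Int)) (i n prof : Int) (pre : String) (vis : PySem.Set (List Int)),
    pvImprGo t mov cam ch 0 fs i n prof pre vis = ([], vis) := by
  intro fs
  induction fs with
  | nil => intro i n prof pre vis; simp [pvImprGo]
  | cons f fs' ih =>
    intro i n prof pre vis
    rw [pvImprGo]
    split
    · exact ih _ _ _ _ _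
    · simp only [pvImpr]
      simp [ih]

-- fuel ≥ 1 ⇒ pvImpr emits at least its own line
lemma pv_impr_len_pos (t : Int) (mov : Option (List (List Int × String))) (cam : List Int → Bool)
    (ch : List Int → List (List Int)) (g : Nat) (no : List Int) (prof : Int) (pre : String)
    (vis : PySem.Set (List Int)) :
    0 < (pvImpr t mov cam ch (g + 1) no prof pre vis).1.length := by
  rw [pvImpr]; simp

-- one-step unfolding of the stack loop on a non-empty stack
lemma pv_loop_cons (t : Int) (mov : Option (List (List Int × String))) (cam : List Int → Bool)
    (ch : List Int → List (List Int)) (fuel : Nat) (no : List Int) (prof : Int) (pre : String)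
    (rest : List (List Int × Int × String)) (vis : PySem.Set (List Int)) :
    pvLoop t mov cam ch fuel ((no, prof, pre) :: rest) vis =
      if PySem.Set.contains vis no then pvLoop t mov cam ch fuel rest vis
      else match fuel with
        | 0 => []
        | fuel'+1 =>
          pvLinha t mov no prof pre (cam no) ::
            pvLoop t mov cam ch fuel' (pvFrames (ch no) 0 ((ch no).length) prof pre ++ rest)
              (PySem.Set.add vis no) := by
  rw [pvLoop.eq_def]

-- the joint bisimulation statements
def pvImprStmt (t : Int) (mov : Option (List (List Int × String))) (cam : List Int → Bool)
    (ch : List Int → List (List Int)) (fuel : Nat) : Prop :=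
  ∀ (no : List Int) (prof : Int) (pre : String) (vis : PySem.Set (List Int))
    (rest : List (List Int × Int × String)), PySem.Set.contains vis no = false →
    pvLoop t mov cam ch fuel ((no, prof, pre) :: rest) vis
      = (pvImpr t mov cam ch fuel no prof pre vis).1
        ++ pvLoop t mov cam ch (fuel - (pvImpr t mov cam ch fuel no prof pre vis).1.length) rest
             (pvImpr t mov cam ch fuel no prof pre vis).2

def pvGoStmt (t : Int) (mov : Option (List (List Int × String))) (cam : List Int → Bool)
    (ch : List Int → List (List Int)) (fuel : Nat) : Prop :=
  ∀ (fs : List (List Int)) (i n prof : Int) (pre : String) (vis : PySem.Set (List Int))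
    (rest : List (List Int × Int × String)),
    pvLoop t mov cam ch fuel (pvFrames fs i n prof pre ++ rest) vis
      = (pvImprGo t mov cam ch fuel fs i n prof pre vis).1
        ++ pvLoop t mov cam ch (fuel - (pvImprGo t mov cam ch fuel fs i n prof pre vis).1.length) rest
             (pvImprGo t mov cam ch fuel fs i n prof pre vis).2

lemma pv_bisim (t : Int) (mov : Option (List (List Int × String))) (cam : List Int → Bool)
    (ch : List Int → List (List Int)) :
    ∀ fuel : Nat, pvImprStmt t mov cam ch fuel ∧ pvGoStmt t mov cam ch fuel := by
  intro fuel
  induction fuel using Nat.strong_induction_on with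
  | _ fuel ih =>
    have himpr : pvImprStmt t mov cam ch fuel := by
      intro no prof pre vis rest hno
      cases fuel with
      | zero =>
        rw [pvImpr]
        simp only [pvLoop, hno]
        simp [pv_loop_zero]
      | succ g =>
        have hgo := (ih g (Nat.lt_succ_self g)).2
        rw [pvImpr]
        simp only [pvLoop, hno]
        simp only [Bool.false_eq_true, if_false]
        rw [hgo (ch no) 0 ((ch no).length) prof pre (PySem.Set.add vis no) rest]
        simp [Nat.succ_sub_succ]
    have hgo : pvGoStmt t mov cam ch fuel := by
      intro fs
      induction fs with
      | nil =>
        intro i n prof pre vis rest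
        simp [pvFrames, pvImprGo]
      | cons f fs' ihfs =>
        intro i n prof pre vis rest
        rw [pvImprGo]
        by_cases hc : PySem.Set.contains vis f = true
        · simp only [pvFrames, List.cons_append]
          rw [pv_loop_cons, if_pos hc]
          simp only [hc, if_true]
          exact ihfs (i + 1) n prof pre vis rest
        · have hc' : PySem.Set.contains vis f = false := by simpa using hc
          simp only [pvFrames, List.cons_append, hc', Bool.false_eq_true, if_false]
          rw [himpr f (prof + 1) (pre ++ (if i == n - 1 then "    " else "│   ")) vis
            (pvFrames fs' (i + 1) n prof pre ++ rest) hc']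
          cases fuel with
          | zero =>
            rw [pvImpr]
            simp [pv_go_zero, pv_loop_zero]
          | succ g =>
            have hlen := pv_impr_len_pos t mov cam ch g f (prof + 1)
              (pre ++ (if i == n - 1 then "    " else "│   ")) vis
            set r1 := pvImpr t mov cam ch (g + 1) f (prof + 1)
              (pre ++ (if i == n - 1 then "    " else "│   ")) vis with hr1
            have hlt : g + 1 - r1.1.length < g + 1 := by omega
            have hgo2 := (ih (g + 1 - r1.1.length) hlt).2
            rw [hgo2 fs' (i + 1) n prof pre r1.2 rest, Nat.sub_sub]
            simp [List.append_assoc]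
    exact ⟨himpr, hgo⟩

-- the empty stack emits nothing (any fuel)
lemma pv_loop_nil (t : Int) (mov : Option (List (List Int × String))) (cam : List Int → Bool)
    (ch : List Int → List (List Int)) (fuel : Nat) (vis : PySem.Set (List Int)) :
    pvLoop t mov cam ch fuel [] vis = [] := by
  rw [pvLoop.eq_def]

-- ===== VERDICT (by name: the statement is the Claim_ definition above) =====
theorem gerar_arvore_busca_spec : Claim_equal_gerar_arvore_busca := by
  intro m est t mov _
  unfold Spec_gerar_arvore_busca gerar_arvore_busca gerar_arvore_busca_alt
  dsimp only
  rw [pv_cam_eq m est (m.length + 2), ← pv_ch_eq m, ← pv_raiz_eq m]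
  cases hr : pvFindRaiz m with
  | none => simp
  | some raiz =>
    simp only []
    congr 1
    have hb := (pv_bisim t mov
      (fun no => PySem.Set.contains (PySem.Set.ofList (pvWalkA m (m.length + 2) est).reverse) no)
      (fun no => (pvFilhosPorPai m).getD (some no) []) (m.length + 2)).1
    rw [hb raiz 0 "" PySem.Set.empty [] (by rfl), pv_loop_nil]
    simp
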